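-- pv_equiv track=rewrite | github.com/happycoder74/adventofcode | python/y2015/d05/aoc_2015_05.py | check_pairs
-- ===== SOURCE A (Python) =====
-- def check_pairs(line) -> bool:
--     zipped = list(zip(line, line[1:]))
--     pairs: dict[tuple[str, str], int] = dict()
--     for index, pair in enumerate(zipped):
--         if pair not in pairs:
--             pairs[pair] = index
--             continue
--         if pairs[pair] < index - 1:
--             return True
--     return False
-- ===== SOURCE B (Python) =====
-- def check_pairs(line) -> bool:
--     zipped = list(zip(line, line[1:]))
--     for i, pair in enumerate(zipped):
--         if pair in zipped[i + 2:]: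
--             return True
--     return False
-- ===== Notes on version B (the rewrite author's own statement) =====
-- stated objective: simpler
-- what changed: Replaces A's first-occurrence dict index with a direct scan: each pair is checked for membership among the pairs two or more positions later.
import Mathlib
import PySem

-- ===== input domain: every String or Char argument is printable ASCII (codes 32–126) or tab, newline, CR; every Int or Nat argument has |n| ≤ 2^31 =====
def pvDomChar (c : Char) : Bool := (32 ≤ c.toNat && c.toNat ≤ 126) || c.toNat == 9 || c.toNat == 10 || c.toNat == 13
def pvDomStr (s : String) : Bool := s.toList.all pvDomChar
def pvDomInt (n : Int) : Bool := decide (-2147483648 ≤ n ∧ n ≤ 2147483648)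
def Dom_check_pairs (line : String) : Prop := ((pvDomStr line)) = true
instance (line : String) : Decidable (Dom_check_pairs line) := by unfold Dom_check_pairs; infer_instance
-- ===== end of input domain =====

-- B replaces A's first-occurrence dict with a direct membership scan among the pairs two or more positions later (simpler, no index table).

-- ===== PORT A =====
-- loop 'for index, pair in enumerate(zipped): …' with early return
def check_pairs_go : List (Int × (Char × Char)) → PySem.Dict (Char × Char) Int → Bool
  | [], _ => false
  | (index, pair) :: rest, pairs =>
    match pairs.get? pair with                     -- 'pair not in pairs' / 'pairs[pair]'
    | none => check_pairs_go rest (pairs.insert pair index)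
    | some v => if v < index - 1 then true else check_pairs_go rest pairs

def check_pairs (line : String) : Bool :=
  let cs := line.toList
  let zipped := List.zip cs (cs.drop 1)            -- list(zip(line, line[1:])); line[1:] = drop 1 (exact: start 1 ≥ 0)
  check_pairs_go (PySem.List.enumerate zipped 0) PySem.Dict.empty

-- ===== PORT B =====
-- loop 'for i, pair in enumerate(zipped): if pair in zipped[i+2:]: return True'
def check_pairs_alt_go (zipped : List (Char × Char)) : List (Int × (Char × Char)) → Bool
  | [] => false
  | (i, pair) :: rest =>
    if pair ∈ zipped.drop (i + 2).toNat then true  -- zipped[i+2:] = drop (i+2) (exact: i ≥ 0 from enumerate)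
    else check_pairs_alt_go zipped rest

def check_pairs_alt (line : String) : Bool :=
  let cs := line.toList
  let zipped := List.zip cs (cs.drop 1)            -- list(zip(line, line[1:])); line[1:] = drop 1 (exact: start 1 ≥ 0)
  check_pairs_alt_go zipped (PySem.List.enumerate zipped 0)

-- ===== PRECONDITION & SPEC =====
def Spec_check_pairs (line : String) (out : Bool) : Prop := out = check_pairs_alt line
instance (line : String) (out : Bool) : Decidable (Spec_check_pairs line out) := by unfold Spec_check_pairs; infer_instance

-- ===== CLAIM (what is proved, stated in full; the proofs are below) =====
def Claim_equal_check_pairs : Prop := ∀ (line : String), Dom_check_pairs line → Spec_check_pairs line (check_pairs line)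

-- ===== LEMMAS AND PROOFS =====

-- index of the first occurrence of q in l (the value A's dict stores)
def firstIdx : List (Char × Char) → (Char × Char) → Option Nat
  | [], _ => none
  | x :: xs, q => if x = q then some 0 else (firstIdx xs q).map (· + 1)

theorem firstIdx_append_singleton (l : List (Char × Char)) (x q : Char × Char) :
    firstIdx (l ++ [x]) q =
      match firstIdx l q with
      | some i => some i
      | none => if x = q then some l.length else none := by
  induction l with
  | nil => simp [firstIdx]
  | cons y ys ih =>
    by_cases h : y = q
    · simp [firstIdx, h]
    · simp only [firstIdx, if_neg h, List.cons_append, ih]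
      cases firstIdx ys q <;> simp

theorem firstIdx_getElem? (l : List (Char × Char)) (q : Char × Char) (i : Nat)
    (h : firstIdx l q = some i) : l[i]? = some q := by
  induction l generalizing i with
  | nil => simp [firstIdx] at h
  | cons y ys ih =>
    by_cases hy : y = q
    · simp [firstIdx, hy] at h; subst h; simp [hy]
    · simp [firstIdx, hy] at h
      obtain ⟨j, hj, rfl⟩ := h
      simpa using ih j hj

theorem firstIdx_min (l : List (Char × Char)) (q : Char × Char) (m : Nat)
    (h : l[m]? = some q) : ∃ i, firstIdx l q = some i ∧ i ≤ m := by
  induction l generalizing m with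
  | nil => simp at h
  | cons y ys ih =>
    by_cases hy : y = q
    · exact ⟨0, by simp [firstIdx, hy], Nat.zero_le m⟩
    · cases m with
      | zero => simp at h; exact absurd h hy
      | succ m =>
        simp at h
        obtain ⟨i, hi, him⟩ := ih m h
        exact ⟨i + 1, by simp [firstIdx, hy, hi], by omega⟩

-- the condition both loops detect
def PairP (z : List (Char × Char)) : Prop :=
  ∃ i j p, i + 2 ≤ j ∧ z[i]? = some p ∧ z[j]? = some p

-- the dict invariant of A's loop
def DInv (z : List (Char × Char)) (k : Nat) (d : PySem.Dict (Char × Char) Int) : Prop :=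
  ∀ q, d.get? q = (firstIdx (z.take k) q).map (fun i => (i : Int))

-- A's loop from position k triggers iff some later index j has a first occurrence two back
def RProp (z : List (Char × Char)) (k : Nat) : Prop :=
  ∃ j i p, k ≤ j ∧ z[j]? = some p ∧ firstIdx (z.take j) p = some i ∧ i + 2 ≤ j

theorem take_succ_of_drop {z : List (Char × Char)} {k : Nat} {p : Char × Char}
    {rest : List (Char × Char)} (h : z.drop k = p :: rest) :
    z.take (k + 1) = z.take k ++ [p] := by
  have hk : z[k]? = some p := by
    have h0 : (z.drop k)[0]? = z[k + 0]? := List.getElem?_drop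
    simpa [h] using h0.symm
  simp [List.take_add_one, hk]

theorem getElem?_of_drop {z : List (Char × Char)} {k : Nat} {p : Char × Char}
    {rest : List (Char × Char)} (h : z.drop k = p :: rest) : z[k]? = some p := by
  have h0 : (z.drop k)[0]? = z[k + 0]? := List.getElem?_drop
  simpa [h] using h0.symm

theorem drop_succ_of_drop {z : List (Char × Char)} {k : Nat} {p : Char × Char}
    {rest : List (Char × Char)} (h : z.drop k = p :: rest) : z.drop (k + 1) = rest := by
  have h0 : List.drop 1 (List.drop k z) = List.drop (k + 1) z := List.drop_drop
  simp [h] at h0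
  exact h0.symm

theorem goA_iff (z : List (Char × Char)) :
    ∀ (s : List (Char × Char)) (k : Nat) (d : PySem.Dict (Char × Char) Int),
      z.drop k = s → DInv z k d →
      (check_pairs_go (PySem.List.enumerate s (k : Int)) d = true ↔ RProp z k) := by
  intro s
  induction s with
  | nil =>
    intro k d hdrop _
    have hlen : z.length ≤ k := by
      have := congrArg List.length hdrop
      simp at this; omega
    simp only [PySem.List.enumerate, check_pairs_go, Bool.false_eq_true, false_iff]
    rintro ⟨j, i, p, hkj, hj, -, -⟩
    have hjlen : j < z.length := (List.getElem?_eq_some_iff.mp hj).1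
    omega
  | cons p rest ih =>
    intro k d hdrop hinv
    have hk : z[k]? = some p := getElem?_of_drop hdrop
    have hdrop' : z.drop (k + 1) = rest := drop_succ_of_drop hdrop
    have htake : z.take (k + 1) = z.take k ++ [p] := take_succ_of_drop hdrop
    rw [PySem.List.enumerate_cons]
    show (check_pairs_go (((k : Int), p) :: PySem.List.enumerate rest ((k : Int) + 1)) d = true ↔ RProp z k)
    have hcast : ((k : Int) + 1) = ((k + 1 : Nat) : Int) := by push_cast; ring
    rw [hcast]
    cases hget : d.get? p with
    | none =>
      have hfi : firstIdx (z.take k) p = none := by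
        have := hinv p; rw [hget] at this
        cases hfi' : firstIdx (z.take k) p with
        | none => rfl
        | some i => rw [hfi'] at this; simp at this
      simp only [check_pairs_go, hget]
      have hklen : k < z.length := (List.getElem?_eq_some_iff.mp hk).1
      have hinv' : DInv z (k + 1) (d.insert p (k : Int)) := by
        intro q
        rw [htake, firstIdx_append_singleton, PySem.Dict.get?_insert]
        by_cases hq : q = p
        · subst hq
          rw [if_pos rfl, hfi]
          simp [List.length_take, Nat.min_eq_left (le_of_lt hklen)]
        · rw [if_neg hq, hinv q]
          cases firstIdx (z.take k) q with
          | none => simp [Ne.symm hq]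
          | some i => simp
      rw [ih (k + 1) _ hdrop' hinv']
      constructor
      · rintro ⟨j, i, q, hkj, hjq, hfq, hij⟩
        exact ⟨j, i, q, by omega, hjq, hfq, hij⟩
      · rintro ⟨j, i, q, hkj, hjq, hfq, hij⟩
        rcases Nat.eq_or_lt_of_le hkj with heq | hlt
        · subst heq
          rw [hk] at hjq; injection hjq with hq; subst hq
          rw [hfi] at hfq; exact absurd hfq (by simp)
        · exact ⟨j, i, q, by omega, hjq, hfq, hij⟩
    | some v =>
      obtain ⟨i0, hfi, hv⟩ : ∃ i0, firstIdx (z.take k) p = some i0 ∧ v = (i0 : Int) := by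
        have := hinv p; rw [hget] at this
        cases hfi' : firstIdx (z.take k) p with
        | none => rw [hfi'] at this; simp at this
        | some i => rw [hfi'] at this; simp at this; exact ⟨i, rfl, this⟩
      have hinv' : DInv z (k + 1) d := by
        intro q
        rw [htake, firstIdx_append_singleton, hinv q]
        by_cases hq : q = p
        · subst hq; rw [hfi]
        · cases firstIdx (z.take k) q with
          | none => simp [Ne.symm hq]
          | some i => simp
      simp only [check_pairs_go, hget]
      by_cases hcond : v < (k : Int) - 1
      · rw [if_pos hcond]
        constructor
        · intro _
          exact ⟨k, i0, p, le_refl k, hk, hfi, by subst hv; omega⟩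
        · intro _; rfl
      · rw [if_neg hcond, ih (k + 1) _ hdrop' hinv']
        constructor
        · rintro ⟨j, i, q, hkj, hjq, hfq, hij⟩
          exact ⟨j, i, q, by omega, hjq, hfq, hij⟩
        · rintro ⟨j, i, q, hkj, hjq, hfq, hij⟩
          rcases Nat.eq_or_lt_of_le hkj with heq | hlt
          · subst heq
            rw [hk] at hjq; injection hjq with hq; subst hq
            rw [hfi] at hfq; injection hfq with hi; subst hi
            subst hv; omega
          · exact ⟨j, i, q, by omega, hjq, hfq, hij⟩

theorem R_iff_PairP (z : List (Char × Char)) : RProp z 0 ↔ PairP z := by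
  constructor
  · rintro ⟨j, i, p, _, hjp, hfi, hij⟩
    have htake : (z.take j)[i]? = some p := firstIdx_getElem? _ _ _ hfi
    have hip : z[i]? = some p := by
      rwa [List.getElem?_take_of_lt (by omega)] at htake
    exact ⟨i, j, p, hij, hip, hjp⟩
  · rintro ⟨i, j, p, hij, hip, hjp⟩
    have hi' : (z.take j)[i]? = some p := by
      rw [List.getElem?_take, if_pos (by omega)]; exact hip
    obtain ⟨i0, hfi, hle⟩ := firstIdx_min _ _ _ hi'
    exact ⟨j, i0, p, Nat.zero_le j, hjp, hfi, by omega⟩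

theorem goB_iff (z : List (Char × Char)) :
    ∀ (s : List (Char × Char)) (k : Nat), z.drop k = s →
      (check_pairs_alt_go z (PySem.List.enumerate s (k : Int)) = true ↔
        ∃ j p, k ≤ j ∧ z[j]? = some p ∧ p ∈ z.drop (j + 2)) := by
  intro s
  induction s with
  | nil =>
    intro k hdrop
    have hlen : z.length ≤ k := by
      have := congrArg List.length hdrop; simp at this; omega
    simp only [PySem.List.enumerate, check_pairs_alt_go, Bool.false_eq_true, false_iff]
    rintro ⟨j, p, hkj, hj, -⟩
    have hjlen : j < z.length := (List.getElem?_eq_some_iff.mp hj).1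
    omega
  | cons p rest ih =>
    intro k hdrop
    have hk : z[k]? = some p := getElem?_of_drop hdrop
    have hdrop' : z.drop (k + 1) = rest := drop_succ_of_drop hdrop
    rw [PySem.List.enumerate_cons]
    have hcast : ((k : Int) + 1) = ((k + 1 : Nat) : Int) := by push_cast; ring
    rw [hcast]
    show ((if p ∈ z.drop ((k : Int) + 2).toNat then true
           else check_pairs_alt_go z (PySem.List.enumerate rest ((k + 1 : Nat) : Int))) = true ↔ _)
    have htn : ((k : Int) + 2).toNat = k + 2 := by omega
    rw [htn]
    by_cases hmem : p ∈ z.drop (k + 2)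
    · rw [if_pos hmem]
      simp only [true_iff]
      exact ⟨k, p, le_refl k, hk, hmem⟩
    · rw [if_neg hmem, ih (k + 1) hdrop']
      constructor
      · rintro ⟨j, q, hkj, hjq, hq⟩
        exact ⟨j, q, by omega, hjq, hq⟩
      · rintro ⟨j, q, hkj, hjq, hq⟩
        rcases Nat.eq_or_lt_of_le hkj with heq | hlt
        · subst heq
          rw [hk] at hjq; injection hjq with hq'; subst hq'
          exact absurd hq hmem
        · exact ⟨j, q, by omega, hjq, hq⟩

theorem B_iff_PairP (z : List (Char × Char)) :
    (∃ j p, 0 ≤ j ∧ z[j]? = some p ∧ p ∈ z.drop (j + 2)) ↔ PairP z := by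
  constructor
  · rintro ⟨j, p, _, hjp, hmem⟩
    obtain ⟨m, hm, hval⟩ := List.getElem_of_mem hmem
    refine ⟨j, j + 2 + m, p, by omega, hjp, ?_⟩
    have : (z.drop (j + 2))[m]? = some p := by
      rw [List.getElem?_eq_getElem hm, hval]
    rwa [List.getElem?_drop] at this
  · rintro ⟨i, j, p, hij, hip, hjp⟩
    refine ⟨i, p, Nat.zero_le i, hip, ?_⟩
    have : (z.drop (i + 2))[j - (i + 2)]? = some p := by
      rw [List.getElem?_drop]
      have : i + 2 + (j - (i + 2)) = j := by omega
      rw [this]; exact hjp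
    exact List.mem_of_getElem? this

-- ===== VERDICT (by name: the statement is the Claim_ definition above) =====
theorem check_pairs_spec : Claim_equal_check_pairs := by
  intro line _
  unfold Spec_check_pairs check_pairs check_pairs_alt
  set z := List.zip line.toList (line.toList.drop 1) with hz
  have hA := goA_iff z z 0 PySem.Dict.empty (by simp)
    (by intro q; simp [firstIdx, PySem.Dict.get?_empty])
  have hB := goB_iff z z 0 (by simp)
  simp only [Nat.cast_zero] at hA hB
  rw [Bool.eq_iff_iff, hA, hB, R_iff_PairP, B_iff_PairP]
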